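-- pv_equiv track=rewrite | github.com/HackerCorpLabs/NDInsight | scripts/reformat-section-22-v2.py | expand_br_row
-- ===== SOURCE A (Python) =====
-- def parse_br_cell(cell):
--     """Parse a cell that may contain <br> tags into a list of values."""
--     if '<br>' in cell:
--         parts = [p.strip() for p in cell.split('<br>')]
--         return parts
--     else:
--         return [cell]
--
-- def expand_br_row(cells):
--     """Expand a row with <br> tags into multiple rows."""
--     # Parse each cell
--     cell_parts = [parse_br_cell(c) for c in cells]
--
--     # Find max number of parts
--     max_parts = max(len(parts) for parts in cell_parts)
--
--     # Build rows
--     rows = []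
--     for i in range(max_parts):
--         row = []
--         for parts in cell_parts:
--             if i < len(parts):
--                 row.append(parts[i])
--             else:
--                 row.append('')  # Pad with empty if this column has fewer parts
--         rows.append(row)
--
--     return rows
-- ===== SOURCE B (Python) =====
-- def parse_br_cell(cell):
--     """Parse a cell that may contain <br> tags into a list of values."""
--     if '<br>' in cell:
--         return [p.strip() for p in cell.split('<br>')]
--     else:
--         return [cell]
--
-- def expand_br_row(cells):
--     """Expand a row with <br> tags into multiple rows (queue-consuming transpose)."""
--     cols = [parse_br_cell(c) for c in cells]
--     rows = []
--     while any(cols):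
--         rows.append([col.pop(0) if col else '' for col in cols])
--     return rows
-- ===== Notes on version B (the rewrite author's own statement) =====
-- stated objective: simpler
-- what changed: Replaces A's max-length computation plus index-and-pad double loop over range(max_parts) with a queue-consuming transpose: while any column still has parts, pop the head of every column (empty columns contribute ''), so the explicit max/index/pad bookkeeping disappears.
import Mathlib
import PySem

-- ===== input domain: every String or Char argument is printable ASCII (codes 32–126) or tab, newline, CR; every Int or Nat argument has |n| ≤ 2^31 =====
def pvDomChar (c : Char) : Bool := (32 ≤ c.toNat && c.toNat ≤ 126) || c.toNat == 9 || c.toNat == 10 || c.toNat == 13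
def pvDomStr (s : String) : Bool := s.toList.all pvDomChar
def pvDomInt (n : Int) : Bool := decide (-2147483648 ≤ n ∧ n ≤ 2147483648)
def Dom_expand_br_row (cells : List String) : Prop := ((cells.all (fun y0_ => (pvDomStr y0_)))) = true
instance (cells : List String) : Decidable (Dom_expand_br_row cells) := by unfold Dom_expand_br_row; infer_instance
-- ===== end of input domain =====

-- B replaces A's index-and-pad double loop over range(max_parts) with a queue-consuming
-- transpose (pop the head of every column while any column is nonempty): simpler, same cost.
-- Pre_ excludes the empty list, on which A's max() raises ValueError (B returns []).

-- ===== PORT A =====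
def parseBrCellA (cell : String) : List String :=
  if PySem.Str.isIn "<br>" cell then
    -- sep "<br>" is nonempty so split? never returns none; getD only discharges the Option
    ((PySem.Str.split? cell "<br>").getD []).map PySem.Str.strip
  else [cell]

def expand_br_row (cells : List String) : List (List String) :=
  let cell_parts := cells.map parseBrCellA
  -- max(len(parts) for parts in cell_parts); exact under Pre_ (cells ≠ [], and every
  -- parts list is nonempty, so the fold with seed 0 is Python's max of the lengths)
  let max_parts := cell_parts.foldl (fun m parts => max m parts.length) 0
  (List.range max_parts).map (fun i =>
    cell_parts.map (fun parts => if i < parts.length then parts.getD i "" else ""))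

-- ===== PORT B =====
def parseBrCellB (cell : String) : List String :=
  if PySem.Str.isIn "<br>" cell then
    -- sep "<br>" is nonempty so split? never returns none; getD only discharges the Option
    ((PySem.Str.split? cell "<br>").getD []).map PySem.Str.strip
  else [cell]

-- 'while any(cols): rows.append([col.pop(0) if col else "" for col in cols])'
-- fuel = total number of stored parts only makes the while-loop total; it is never exhausted
def brLoopFuel : Nat → List (List String) → List (List String)
  | 0, _ => []
  | Nat.succ fuel, cols =>
    if cols.any (fun c => !c.isEmpty) then
      (cols.map (fun c => c.headD "")) :: brLoopFuel fuel (cols.map List.tail)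
    else []

def expand_br_row_alt (cells : List String) : List (List String) :=
  let cols := cells.map parseBrCellB
  brLoopFuel (cols.map List.length).sum cols

-- ===== PRECONDITION & SPEC =====
-- Pre_ excludes exactly the empty list: there Python A's max() raises ValueError.
def Pre_expand_br_row (cells : List String) : Prop := cells ≠ []
instance (cells : List String) : Decidable (Pre_expand_br_row cells) := by unfold Pre_expand_br_row; infer_instance
def pvWitness_expand_br_row : List String := ["a<br>b", "c"]

def Spec_expand_br_row (cells : List String) (out : List (List String)) : Prop := out = expand_br_row_alt cells
instance (cells : List String) (out : List (List String)) : Decidable (Spec_expand_br_row cells out) := by unfold Spec_expand_br_row; infer_instance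

-- ===== CLAIM (what is proved, stated in full; the proofs are below) =====
def Claim_equal_expand_br_row : Prop := ∀ (cells : List String), Dom_expand_br_row cells → Pre_expand_br_row cells → Spec_expand_br_row cells (expand_br_row cells)
-- ===== LEMMAS AND PROOFS =====

-- the fold A uses for max() of the lengths
def maxLen (cols : List (List String)) : Nat :=
  cols.foldl (fun m parts => max m parts.length) 0

theorem maxLen_foldl (cols : List (List String)) (a : Nat) :
    cols.foldl (fun m parts => max m parts.length) a = max a (maxLen cols) := by
  induction cols generalizing a with
  | nil => simp [maxLen]
  | cons c cs ih =>
    simp only [maxLen, List.foldl_cons]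
    rw [ih, ih (max 0 c.length)]
    omega

theorem maxLen_cons (c : List String) (cs : List (List String)) :
    maxLen (c :: cs) = max c.length (maxLen cs) := by
  simp only [maxLen, List.foldl_cons]
  rw [maxLen_foldl cs (max 0 c.length)]
  simp only [maxLen]
  omega

theorem maxLen_eq_zero_iff (cols : List (List String)) :
    maxLen cols = 0 ↔ (cols.any (fun c => !c.isEmpty)) = false := by
  induction cols with
  | nil => simp [maxLen]
  | cons c cs ih =>
    rw [maxLen_cons]
    simp only [List.any_cons, Bool.or_eq_false_iff, Bool.not_eq_false', List.isEmpty_iff, ← ih]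
    constructor
    · intro h; exact ⟨List.eq_nil_of_length_eq_zero (by omega), by omega⟩
    · rintro ⟨rfl, h⟩; simp [h]

theorem maxLen_tail (cols : List (List String)) :
    maxLen (cols.map List.tail) = maxLen cols - 1 := by
  induction cols with
  | nil => simp [maxLen]
  | cons c cs ih =>
    rw [List.map_cons, maxLen_cons, maxLen_cons, ih, List.length_tail]
    omega

theorem maxLen_le_sum (cols : List (List String)) :
    maxLen cols ≤ (cols.map List.length).sum := by
  induction cols with
  | nil => simp [maxLen]
  | cons c cs ih =>
    rw [maxLen_cons, List.map_cons, List.sum_cons]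
    omega

theorem getD_tail (c : List String) (i : Nat) :
    c.tail.getD i "" = c.getD (i + 1) "" := by
  cases c <;> simp

theorem headD_eq_getD (c : List String) : c.headD "" = c.getD 0 "" := by
  cases c <;> simp

theorem brLoopFuel_eq (fuel : Nat) (cols : List (List String)) (h : maxLen cols ≤ fuel) :
    brLoopFuel fuel cols = (List.range (maxLen cols)).map (fun i => cols.map (fun c => c.getD i "")) := by
  induction fuel generalizing cols with
  | zero =>
    have h0 : maxLen cols = 0 := by omega
    simp [brLoopFuel, h0]
  | succ fuel ih =>
    rcases Bool.eq_false_or_eq_true (cols.any fun c => !c.isEmpty) with ht | hf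
    swap
    · have h0 : maxLen cols = 0 := (maxLen_eq_zero_iff cols).mpr hf
      simp [brLoopFuel, hf, h0]
    · have h0 : maxLen cols ≠ 0 := fun hz => by
        rw [(maxLen_eq_zero_iff cols).mp hz] at ht; cases ht
      obtain ⟨m, hm⟩ : ∃ m, maxLen cols = m + 1 := ⟨maxLen cols - 1, by omega⟩
      have htail : maxLen (cols.map List.tail) = m := by rw [maxLen_tail, hm]; omega
      rw [brLoopFuel, if_pos ht, ih _ (by omega), htail, hm]
      rw [List.range_succ_eq_map, List.map_cons, List.map_map]
      congr 1
      · exact List.map_congr_left (fun c _ => headD_eq_getD c)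
      · apply List.map_congr_left
        intro i _
        rw [List.map_map]
        exact List.map_congr_left (fun c _ => getD_tail c i)

theorem ite_getD (parts : List String) (i : Nat) :
    (if i < parts.length then parts.getD i "" else "") = parts.getD i "" := by
  split
  · rfl
  · rw [List.getD_eq_default]; omega

theorem parseBr_eq : parseBrCellA = parseBrCellB := rfl

theorem alt_eq (cells : List String) :
    expand_br_row_alt cells = (List.range (maxLen (cells.map parseBrCellB))).map
      (fun i => (cells.map parseBrCellB).map (fun c => c.getD i "")) := by
  simp only [expand_br_row_alt]
  exact brLoopFuel_eq _ _ (maxLen_le_sum _)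

-- ===== VERDICT (by name: the statement is the Claim_ definition above) =====
theorem expand_br_row_spec : Claim_equal_expand_br_row := by
  intro cells _ _
  show expand_br_row cells = expand_br_row_alt cells
  rw [alt_eq]
  simp only [expand_br_row, parseBr_eq]
  apply List.map_congr_left
  intro i _
  apply List.map_congr_left
  intro parts _
  exact ite_getD parts i
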